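-- pv_equiv track=rewrite | github.com/brawlingthebits/cederj-programming-fundamentals | AD1s/2018-2/katas dos tutores/AD1Q2.py | contarVogaisDigitos
-- ===== SOURCE A (Python) =====
-- def contarVogaisDigitos(pals):
--     qVogs, qDigs = 0, 0
--     for p in pals:
--         for letra in p:
--             if letra in "0123456789":
--                 qDigs += 1
--             elif letra.upper() in "AEIOU":
--                 qVogs += 1
--     return qVogs, qDigs
-- ===== SOURCE B (Python) =====
-- def contarVogaisDigitos(pals):
--     freq = {}
--     for p in pals:
--         for c in p:
--             freq[c] = freq.get(c, 0) + 1
--     qDigs = sum(freq.get(c, 0) for c in "0123456789")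
--     qVogs = sum(freq.get(c, 0) for c in "aeiouAEIOU")
--     return qVogs, qDigs
-- ===== Notes on version B (the rewrite author's own statement) =====
-- stated objective: alternative
-- what changed: B builds a character frequency table in one tabulating pass (no per-character digit/vowel branching), then obtains the digit and vowel counts by summing the table over the fixed alphabets '0123456789' and 'aeiouAEIOU'.
import Mathlib
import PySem

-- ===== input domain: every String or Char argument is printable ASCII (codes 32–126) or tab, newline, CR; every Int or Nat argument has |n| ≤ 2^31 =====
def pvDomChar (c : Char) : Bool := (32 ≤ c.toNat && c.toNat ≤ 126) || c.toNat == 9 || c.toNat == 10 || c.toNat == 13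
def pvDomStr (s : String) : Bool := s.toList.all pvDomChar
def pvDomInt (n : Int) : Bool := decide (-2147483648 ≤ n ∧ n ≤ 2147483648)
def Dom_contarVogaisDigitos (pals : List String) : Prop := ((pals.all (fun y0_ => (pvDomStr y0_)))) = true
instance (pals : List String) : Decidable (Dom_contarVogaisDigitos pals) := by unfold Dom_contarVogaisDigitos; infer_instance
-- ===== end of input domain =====

-- B replaces A's per-character if/elif branching by a one-pass frequency table queried over the
-- fixed digit and vowel alphabets (objective: alternative decomposition, same cost).

-- ===== PORT A =====
def contarVogaisDigitos (pals : List String) : Int × Int :=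
  let r := pals.foldl (fun (acc : Int × Int) p =>
    p.toList.foldl (fun (acc : Int × Int) letra =>
      if letra ∈ "0123456789".toList then (acc.1, acc.2 + 1)
      else if PySem.Chars.upperChar letra ∈ "AEIOU".toList then (acc.1 + 1, acc.2)
      else acc) acc) (0, 0)
  r

-- ===== PORT B =====
def contarVogaisDigitos_alt (pals : List String) : Int × Int :=
  let freq : PySem.Dict Char Int :=
    pals.foldl (fun d p => p.toList.foldl (fun d c => d.insert c (d.getD c 0 + 1)) d)
      PySem.Dict.empty
  let qDigs := "0123456789".toList.foldl (fun s c => s + freq.getD c 0) 0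
  let qVogs := "aeiouAEIOU".toList.foldl (fun s c => s + freq.getD c 0) 0
  (qVogs, qDigs)

-- ===== PRECONDITION & SPEC =====
def Spec_contarVogaisDigitos (pals : List String) (out : Int × Int) : Prop := out = contarVogaisDigitos_alt pals
instance (pals : List String) (out : Int × Int) : Decidable (Spec_contarVogaisDigitos pals out) := by unfold Spec_contarVogaisDigitos; infer_instance

-- ===== CLAIM (what is proved, stated in full; the proofs are below) =====
def Claim_equal_contarVogaisDigitos : Prop := ∀ (pals : List String), Dom_contarVogaisDigitos pals → Spec_contarVogaisDigitos pals (contarVogaisDigitos pals)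

-- ===== LEMMAS AND PROOFS =====

def pvDig (c : Char) : Bool := c ∈ "0123456789".toList
def pvVogA (c : Char) : Bool := !pvDig c && (PySem.Chars.upperChar c ∈ "AEIOU".toList)
def pvVogB (c : Char) : Bool := c ∈ "aeiouAEIOU".toList

-- per-character classification on the ASCII domain
set_option maxRecDepth 100000 in
theorem pv_char_fact (c : Char) (h : pvDomChar c = true) : pvVogA c = pvVogB c := by
  have key : ∀ n : Fin 256, pvDomChar (Char.ofNat n.val) = true →
      pvVogA (Char.ofNat n.val) = pvVogB (Char.ofNat n.val) := by decide
  have hlt : c.toNat < 256 := by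
    unfold pvDomChar at h
    simp only [Bool.or_eq_true, Bool.and_eq_true, decide_eq_true_eq, beq_iff_eq] at h
    omega
  have hc : Char.ofNat c.toNat = c := Char.ofNat_toNat c
  have := key ⟨c.toNat, hlt⟩ (by rw [hc]; exact h)
  rwa [hc] at this

theorem pv_stepA (x : Char) (acc : Int × Int) :
    (if x ∈ "0123456789".toList then (acc.1, acc.2 + 1)
     else if PySem.Chars.upperChar x ∈ "AEIOU".toList then (acc.1 + 1, acc.2)
     else acc)
    = (acc.1 + (if pvVogA x then (1 : Int) else 0),
       acc.2 + (if pvDig x then (1 : Int) else 0)) := by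
  by_cases h1 : x ∈ "0123456789".toList
  · have hd : pvDig x = true := by simp only [pvDig, decide_eq_true_eq]; exact h1
    have hv : pvVogA x = false := by simp [pvVogA, hd]
    rw [if_pos h1]
    simp [hv, hd]
  · have hd : pvDig x = false := by simp only [pvDig, decide_eq_false_iff_not]; exact h1
    rw [if_neg h1]
    by_cases h2 : PySem.Chars.upperChar x ∈ "AEIOU".toList
    · have hv : pvVogA x = true := by
        simp only [pvVogA, hd, Bool.not_false, Bool.true_and, decide_eq_true_eq]; exact h2
      rw [if_pos h2]
      simp [hv, hd]
    · have hv : pvVogA x = false := by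
        simp only [pvVogA, hd, Bool.not_false, Bool.true_and, decide_eq_false_iff_not]; exact h2
      rw [if_neg h2]
      simp [hv, hd]

-- A's inner fold counts digits / elif-vowels
theorem pv_foldA (cs : List Char) (acc : Int × Int) :
    cs.foldl (fun (acc : Int × Int) letra =>
      if letra ∈ "0123456789".toList then (acc.1, acc.2 + 1)
      else if PySem.Chars.upperChar letra ∈ "AEIOU".toList then (acc.1 + 1, acc.2)
      else acc) acc
    = (acc.1 + cs.countP pvVogA, acc.2 + cs.countP pvDig) := by
  induction cs generalizing acc with
  | nil => simp
  | cons x xs ih =>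
    rw [List.foldl_cons, pv_stepA, ih]
    simp only [List.countP_cons, Prod.mk.injEq]
    refine ⟨?_, ?_⟩
    · by_cases h : pvVogA x <;> simp [h] <;> ring
    · by_cases h : pvDig x <;> simp [h] <;> ring

theorem pv_A_eq (pals : List String) :
    contarVogaisDigitos pals =
      (((pals.flatMap String.toList).countP pvVogA : Int),
       ((pals.flatMap String.toList).countP pvDig : Int)) := by
  unfold contarVogaisDigitos
  suffices h : ∀ (acc : Int × Int), pals.foldl (fun (acc : Int × Int) p =>
      p.toList.foldl (fun (acc : Int × Int) letra =>
        if letra ∈ "0123456789".toList then (acc.1, acc.2 + 1)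
        else if PySem.Chars.upperChar letra ∈ "AEIOU".toList then (acc.1 + 1, acc.2)
        else acc) acc) acc
      = (acc.1 + (pals.flatMap String.toList).countP pvVogA,
         acc.2 + (pals.flatMap String.toList).countP pvDig) by
    rw [h (0,0)]; simp
  induction pals with
  | nil => intro acc; simp
  | cons p ps ih =>
    intro acc
    rw [List.foldl_cons, pv_foldA, ih]
    simp only [List.flatMap_cons, List.countP_append, Prod.mk.injEq]
    constructor <;> push_cast <;> ring

-- B's frequency table holds the multiset of all characters
theorem pv_freq (pals : List String) (d : PySem.Dict Char Int) (c : Char) :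
    (pals.foldl (fun d p => p.toList.foldl (fun d c => d.insert c (d.getD c 0 + 1)) d) d).getD c 0
      = d.getD c 0 + ((pals.flatMap String.toList).count c : Int) := by
  induction pals generalizing d with
  | nil => simp
  | cons p ps ih =>
    simp only [List.foldl_cons, ih, PySem.Dict.getD_foldl_insert_add_one,
      List.flatMap_cons, List.count_append]
    push_cast; ring

-- a sum-shaped foldl is the seed plus the mapped sum
theorem pv_foldl_sum (m : Char → Int) (ks : List Char) (a : Int) :
    ks.foldl (fun s c => s + m c) a = a + (ks.map m).sum := by
  induction ks generalizing a with
  | nil => simp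
  | cons k ks ih => rw [List.foldl_cons, ih]; simp; ring

theorem pv_countP_mem_cons (k : Char) (ks cs : List Char) (hk : k ∉ ks) :
    cs.countP (fun x => x ∈ k :: ks) = cs.count k + cs.countP (fun x => x ∈ ks) := by
  induction cs with
  | nil => simp
  | cons y cs ih =>
    simp only [List.countP_cons, List.count_cons, ih]
    by_cases hy1 : y = k
    · subst hy1
      simp [hk]
      omega
    · by_cases hy2 : y ∈ ks <;> simp [hy1, hy2] <;> omega

-- summing counts over a duplicate-free alphabet = counting membership
theorem pv_map_sum_count (ks cs : List Char) (hnd : ks.Nodup) :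
    (ks.map (fun c => (cs.count c : Int))).sum
      = (cs.countP (fun x => x ∈ ks) : Int) := by
  induction ks with
  | nil => simp
  | cons k ks ih =>
    obtain ⟨hk, hnd'⟩ := List.nodup_cons.mp hnd
    rw [List.map_cons, List.sum_cons, ih hnd', pv_countP_mem_cons k ks cs hk]
    push_cast; ring

theorem pv_B_eq (pals : List String) :
    contarVogaisDigitos_alt pals =
      (((pals.flatMap String.toList).countP pvVogB : Int),
       ((pals.flatMap String.toList).countP pvDig : Int)) := by
  unfold contarVogaisDigitos_alt
  have hfreq : ∀ c, (pals.foldl (fun d p => p.toList.foldl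
      (fun d c => d.insert c (d.getD c 0 + 1)) d) PySem.Dict.empty).getD c 0
        = ((pals.flatMap String.toList).count c : Int) := by
    intro c; rw [pv_freq]; simp
  simp only [hfreq, Prod.mk.injEq]
  refine ⟨?_, ?_⟩
  · rw [pv_foldl_sum, pv_map_sum_count _ _ (by decide), zero_add]
    congr 1
  · rw [pv_foldl_sum, pv_map_sum_count _ _ (by decide), zero_add]
    congr 1

-- ===== VERDICT (by name: the statement is the Claim_ definition above) =====
theorem contarVogaisDigitos_spec : Claim_equal_contarVogaisDigitos := by
  intro pals hdom
  unfold Spec_contarVogaisDigitos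
  rw [pv_A_eq, pv_B_eq]
  have hmem : ∀ x ∈ pals.flatMap String.toList, pvDomChar x = true := by
    intro x hx
    obtain ⟨s, hs, hxs⟩ := List.mem_flatMap.mp hx
    have := (List.all_eq_true.mp hdom) s hs
    exact List.all_eq_true.mp (by simpa [pvDomStr] using this) x hxs
  have : (pals.flatMap String.toList).countP pvVogA = (pals.flatMap String.toList).countP pvVogB :=
    List.countP_congr (fun x hx => by rw [pv_char_fact x (hmem x hx)])
  rw [this]
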